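-- pv_equiv track=rewrite | github.com/joshuaowalker/speconsense | speconsense/refine.py | get_adjacent_consensus_positions
-- ===== SOURCE A (Python) =====
-- from typing import List, Tuple, Set, Optional, Dict
--
-- def get_adjacent_consensus_positions(msa_position: int,
--                                      msa_to_consensus_pos: Dict[int, Optional[int]]) -> Tuple[Optional[int], Optional[int]]:
--     """
--     For an insertion column in the MSA, find the adjacent consensus positions.
--
--     Args:
--         msa_position: MSA position of the insertion
--         msa_to_consensus_pos: Mapping from MSA positions to consensus positions
--
--     Returns:
--         Tuple of (left_consensus_pos, right_consensus_pos)
--         Either may be None if at the start/end of the sequence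
--     """
--     # Find previous consensus position
--     left_pos = None
--     for i in range(msa_position - 1, -1, -1):
--         if i in msa_to_consensus_pos and msa_to_consensus_pos[i] is not None:
--             left_pos = msa_to_consensus_pos[i]
--             break
--
--     # Find next consensus position
--     right_pos = None
--     max_msa_pos = max(msa_to_consensus_pos.keys())
--     for i in range(msa_position + 1, max_msa_pos + 1):
--         if i in msa_to_consensus_pos and msa_to_consensus_pos[i] is not None:
--             right_pos = msa_to_consensus_pos[i]
--             break
--
--     return left_pos, right_pos
-- ===== SOURCE B (Python) =====
-- def get_adjacent_consensus_positions(msa_position, msa_to_consensus_pos):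
--     # One pass over the items: collect candidate keys on each side, then pick
--     # the extremum (max below / min above) and look its value up.
--     left_keys = [k for k, v in msa_to_consensus_pos.items()
--                  if v is not None and 0 <= k < msa_position]
--     right_keys = [k for k, v in msa_to_consensus_pos.items()
--                   if v is not None and k > msa_position]
--     left_pos = msa_to_consensus_pos[max(left_keys)] if left_keys else None
--     right_pos = msa_to_consensus_pos[min(right_keys)] if right_keys else None
--     return left_pos, right_pos
-- ===== Notes on version B (the rewrite author's own statement) =====
-- stated objective: alternative
-- what changed: Replaces A's two outward break-on-first-hit range scans (computing range lengths from msa_position and max key) with a single pass over the dict items that collects candidate keys on each side and selects the max-below / min-above key.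
import Mathlib
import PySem

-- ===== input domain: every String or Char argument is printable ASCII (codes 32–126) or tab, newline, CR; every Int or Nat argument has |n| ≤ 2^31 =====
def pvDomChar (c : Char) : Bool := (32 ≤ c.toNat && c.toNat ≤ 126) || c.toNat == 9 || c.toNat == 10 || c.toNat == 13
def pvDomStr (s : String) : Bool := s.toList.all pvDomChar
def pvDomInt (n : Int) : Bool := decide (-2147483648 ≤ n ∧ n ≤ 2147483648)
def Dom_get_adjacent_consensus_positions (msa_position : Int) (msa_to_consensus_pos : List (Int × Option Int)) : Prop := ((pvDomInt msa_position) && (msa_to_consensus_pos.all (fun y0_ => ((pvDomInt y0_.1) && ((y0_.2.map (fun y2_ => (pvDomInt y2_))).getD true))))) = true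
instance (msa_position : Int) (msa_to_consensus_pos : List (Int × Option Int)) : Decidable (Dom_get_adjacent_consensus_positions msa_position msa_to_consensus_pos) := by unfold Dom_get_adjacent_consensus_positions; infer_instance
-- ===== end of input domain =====

-- B replaces A's two outward break-on-first-hit range scans with one pass over the
-- dict items, selecting the max key below / min key above the insertion column
-- (objective: alternative decomposition; return values proved equal on Pre_).

-- dict lookup d[i] on the association list: FIRST match (exact Python-dict lookup
-- under the convention that the list has unique keys; uniqueness is in Pre_)
def pvLookup (d : List (Int × Option Int)) (i : Int) : Option (Option Int) :=
  (d.find? (fun p => p.1 == i)).map (·.2)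

-- ===== PORT A =====
-- 'i in msa_to_consensus_pos and msa_to_consensus_pos[i] is not None' → the hit value
def pvHit (d : List (Int × Option Int)) (i : Int) : Option Int :=
  match pvLookup d i with
  | some (some v) => some v
  | _ => none

-- the for-loop with break: first i in the range whose pvHit is some
def pvScanA (d : List (Int × Option Int)) : List Int → Option Int
  | [] => none
  | i :: rest =>
    match pvHit d i with
    | some v => some v
    | none => pvScanA d rest

def get_adjacent_consensus_positions (msa_position : Int) (msa_to_consensus_pos : List (Int × Option Int)) : Option Int × Option Int :=
  let left_pos := pvScanA msa_to_consensus_pos (PySem.List.pyRange (msa_position - 1) (-1) (-1))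
  -- max(msa_to_consensus_pos.keys()); Python raises ValueError on an empty dict,
  -- excluded by Pre_ (the .getD 0 is never reached inside Pre_)
  let max_msa_pos := (PySem.List.max? (msa_to_consensus_pos.map (·.1)) (fun x => x)).getD 0
  let right_pos := pvScanA msa_to_consensus_pos (PySem.List.pyRange (msa_position + 1) (max_msa_pos + 1) 1)
  (left_pos, right_pos)

-- ===== PORT B =====
def get_adjacent_consensus_positions_alt (msa_position : Int) (msa_to_consensus_pos : List (Int × Option Int)) : Option Int × Option Int :=
  let left_keys := (msa_to_consensus_pos.filter
    (fun p => p.2.isSome && decide (0 ≤ p.1) && decide (p.1 < msa_position))).map (·.1)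
  let right_keys := (msa_to_consensus_pos.filter
    (fun p => p.2.isSome && decide (msa_position < p.1))).map (·.1)
  let left_pos := match PySem.List.max? left_keys (fun x => x) with
    | some k => (pvLookup msa_to_consensus_pos k).getD none  -- k is a key, lookup never misses
    | none => none
  let right_pos := match PySem.List.min? right_keys (fun x => x) with
    | some k => (pvLookup msa_to_consensus_pos k).getD none
    | none => none
  (left_pos, right_pos)

-- ===== PRECONDITION & SPEC =====
-- Pre_ excludes (a) the empty dict, on which A's max() raises ValueError, and
-- (b) association lists with duplicate keys, which do not encode a Python dict
-- (dict keys are unique), so neither is an input Python A returns on.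
def Pre_get_adjacent_consensus_positions (msa_position : Int) (msa_to_consensus_pos : List (Int × Option Int)) : Prop :=
  msa_to_consensus_pos ≠ [] ∧ (msa_to_consensus_pos.map (·.1)).Nodup

instance (msa_position : Int) (msa_to_consensus_pos : List (Int × Option Int)) : Decidable (Pre_get_adjacent_consensus_positions msa_position msa_to_consensus_pos) := by
  unfold Pre_get_adjacent_consensus_positions; infer_instance

def pvWitness_get_adjacent_consensus_positions : Int × (List (Int × Option Int)) :=
  (2, [(0, some 0), (1, none), (3, some 1)])

def Spec_get_adjacent_consensus_positions (msa_position : Int) (msa_to_consensus_pos : List (Int × Option Int)) (out : Option Int × Option Int) : Prop := out = get_adjacent_consensus_positions_alt msa_position msa_to_consensus_pos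
instance (msa_position : Int) (msa_to_consensus_pos : List (Int × Option Int)) (out : Option Int × Option Int) : Decidable (Spec_get_adjacent_consensus_positions msa_position msa_to_consensus_pos out) := by unfold Spec_get_adjacent_consensus_positions; infer_instance

-- ===== CLAIM (what is proved, stated in full; the proofs are below) =====
def Claim_equal_get_adjacent_consensus_positions : Prop := ∀ (msa_position : Int) (msa_to_consensus_pos : List (Int × Option Int)), Dom_get_adjacent_consensus_positions msa_position msa_to_consensus_pos → Pre_get_adjacent_consensus_positions msa_position msa_to_consensus_pos → Spec_get_adjacent_consensus_positions msa_position msa_to_consensus_pos (get_adjacent_consensus_positions msa_position msa_to_consensus_pos)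


-- ===== LEMMAS AND PROOFS =====

lemma pvLookup_mem {d : List (Int × Option Int)} {i : Int} {w : Option Int}
    (h : pvLookup d i = some w) : (i, w) ∈ d := by
  unfold pvLookup at h
  cases hf : d.find? (fun p => p.1 == i) with
  | none => rw [hf] at h; simp at h
  | some p =>
    rw [hf] at h
    simp at h
    have hp := List.find?_some hf
    simp at hp
    have hm := List.mem_of_find?_eq_some hf
    have hpe : p = (i, w) := by
      obtain ⟨a, b⟩ := p
      simp at hp h ⊢
      exact ⟨hp, h⟩
    rwa [hpe] at hm

lemma pvLookup_of_mem {d : List (Int × Option Int)} {k : Int} {w : Option Int}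
    (hn : (d.map (·.1)).Nodup) (hm : (k, w) ∈ d) : pvLookup d k = some w := by
  induction d with
  | nil => simp at hm
  | cons p rest ih =>
    have hn1 : p.1 ∉ rest.map (·.1) := (List.nodup_cons.mp (by simpa using hn)).1
    have hn2 : (rest.map (·.1)).Nodup := (List.nodup_cons.mp (by simpa using hn)).2
    rcases List.mem_cons.mp hm with h | h
    · subst h; simp [pvLookup]
    · have hne : p.1 ≠ k := by
        intro he
        exact hn1 (he ▸ List.mem_map.mpr ⟨(k, w), h, rfl⟩)
      unfold pvLookup at ih ⊢
      rw [List.find?_cons_of_neg (by simpa using hne)]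
      exact ih hn2 h

-- pvHit is some v exactly when (k, some v) is an entry of d (unique keys)
lemma pvHit_some_iff {d : List (Int × Option Int)} (hn : (d.map (·.1)).Nodup)
    (k v : Int) : pvHit d k = some v ↔ (k, some v) ∈ d := by
  constructor
  · intro h
    unfold pvHit at h
    cases hl : pvLookup d k with
    | none => rw [hl] at h; simp at h
    | some w =>
      cases w with
      | none => rw [hl] at h; simp at h
      | some u => rw [hl] at h; simp at h; subst h; exact pvLookup_mem hl
  · intro h
    have := pvLookup_of_mem hn h
    simp [pvHit, this]

lemma pvHit_none_of_not_mem {d : List (Int × Option Int)} (hn : (d.map (·.1)).Nodup)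
    {k : Int} (h : ∀ v : Int, (k, some v) ∉ d) : pvHit d k = none := by
  cases hh : pvHit d k with
  | none => rfl
  | some v => exact absurd ((pvHit_some_iff hn k v).mp hh) (h v)

-- descending scan: everything strictly above k (and below the bound M) misses, k hits
lemma scan_desc_hit (d : List (Int × Option Int)) (k v M : Int)
    (h0 : 0 ≤ k)
    (hk : pvHit d k = some v)
    (habove : ∀ i, k < i → i < M → pvHit d i = none) :
    ∀ n : Nat, k + n < M → pvScanA d (PySem.List.pyRange (k + n) (-1) (-1)) = some v := by
  intro n
  induction n with
  | zero =>
    intro _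
    rw [show k + ((0 : Nat) : Int) = k by push_cast; ring]
    rw [PySem.List.pyRange_neg_one_cons (by omega)]
    simp [pvScanA, hk]
  | succ n ih =>
    intro hM
    push_cast at hM ⊢
    rw [PySem.List.pyRange_neg_one_cons (by omega)]
    have htop : pvHit d (k + ((n : Int) + 1)) = none := habove _ (by omega) (by omega)
    rw [show k + ((n : Int) + 1) - 1 = k + (n : Int) by ring]
    simp [pvScanA, htop]
    exact ih (by omega)

-- descending scan with no hit anywhere in [0, M)
lemma scan_desc_none (d : List (Int × Option Int)) (M : Int)
    (hnone : ∀ i, 0 ≤ i → i < M → pvHit d i = none) :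
    ∀ (n : Nat) (a : Int), a < n → a < M → pvScanA d (PySem.List.pyRange a (-1) (-1)) = none := by
  intro n
  induction n with
  | zero =>
    intro a ha _
    rw [PySem.List.pyRange_neg_one_eq_nil (by omega)]
    rfl
  | succ n ih =>
    intro a ha hM
    by_cases h0 : a ≤ -1
    · rw [PySem.List.pyRange_neg_one_eq_nil h0]; rfl
    · push_neg at h0
      rw [PySem.List.pyRange_neg_one_cons h0]
      have hmiss : pvHit d a = none := hnone a (by omega) hM
      simp [pvScanA, hmiss]
      exact ih (a - 1) (by push_cast at ha ⊢; omega) (by omega)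

-- ascending scan: everything in [A, k) misses, k hits, k < b
lemma scan_asc_hit (d : List (Int × Option Int)) (k v A b : Int)
    (hk : pvHit d k = some v)
    (hbelow : ∀ i, A ≤ i → i < k → pvHit d i = none)
    (hkb : k < b) :
    ∀ n : Nat, A ≤ k - n → pvScanA d (PySem.List.pyRange (k - n) b 1) = some v := by
  intro n
  induction n with
  | zero =>
    intro _
    rw [show k - ((0 : Nat) : Int) = k by push_cast; ring]
    rw [PySem.List.pyRange_one_cons hkb]
    simp [pvScanA, hk]
  | succ n ih =>
    intro hA
    push_cast at hA ⊢
    rw [PySem.List.pyRange_one_cons (by omega)]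
    have htop : pvHit d (k - ((n : Int) + 1)) = none := hbelow _ (by omega) (by omega)
    rw [show k - ((n : Int) + 1) + 1 = k - (n : Int) by ring]
    simp [pvScanA, htop]
    exact ih (by omega)

-- ascending scan with no hit anywhere in [A, b)
lemma scan_asc_none (d : List (Int × Option Int)) (A b : Int)
    (hnone : ∀ i, A ≤ i → i < b → pvHit d i = none) :
    ∀ (n : Nat) (a : Int), A ≤ a → b - a ≤ n → pvScanA d (PySem.List.pyRange a b 1) = none := by
  intro n
  induction n with
  | zero =>
    intro a hAa ha
    rw [PySem.List.pyRange_one_eq_nil (by omega)]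
    rfl
  | succ n ih =>
    intro a hAa ha
    by_cases hab : b ≤ a
    · rw [PySem.List.pyRange_one_eq_nil hab]; rfl
    · push_neg at hab
      rw [PySem.List.pyRange_one_cons hab]
      have hmiss : pvHit d a = none := hnone a hAa hab
      simp [pvScanA, hmiss]
      exact ih (a + 1) (by omega) (by push_cast at ha ⊢; omega)

-- membership in B's candidate key lists, spelled out
lemma mem_left_keys (m : Int) (d : List (Int × Option Int)) (k : Int) :
    k ∈ (d.filter (fun p => p.2.isSome && decide (0 ≤ p.1) && decide (p.1 < m))).map (·.1) ↔
      ∃ v : Int, (k, some v) ∈ d ∧ 0 ≤ k ∧ k < m := by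
  simp only [List.mem_map, List.mem_filter, Bool.and_eq_true, decide_eq_true_eq,
    Option.isSome_iff_exists]
  constructor
  · rintro ⟨⟨k', w⟩, ⟨hmem, ⟨⟨v, hv⟩, h0⟩, hm⟩, rfl⟩
    exact ⟨v, by rw [← hv]; exact hmem, h0, hm⟩
  · rintro ⟨v, hmem, h0, hm⟩
    exact ⟨(k, some v), ⟨hmem, ⟨⟨v, rfl⟩, h0⟩, hm⟩, rfl⟩

lemma mem_right_keys (m : Int) (d : List (Int × Option Int)) (k : Int) :
    k ∈ (d.filter (fun p => p.2.isSome && decide (m < p.1))).map (·.1) ↔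
      ∃ v : Int, (k, some v) ∈ d ∧ m < k := by
  simp only [List.mem_map, List.mem_filter, Bool.and_eq_true, decide_eq_true_eq,
    Option.isSome_iff_exists]
  constructor
  · rintro ⟨⟨k', w⟩, ⟨hmem, ⟨v, hv⟩, hm⟩, rfl⟩
    exact ⟨v, by rw [← hv]; exact hmem, hm⟩
  · rintro ⟨v, hmem, hm⟩
    exact ⟨(k, some v), ⟨hmem, ⟨v, rfl⟩, hm⟩, rfl⟩

-- left component: A's downward scan = B's lookup at the max candidate key
lemma left_eq (m : Int) (d : List (Int × Option Int)) (hnodup : (d.map (·.1)).Nodup) :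
    pvScanA d (PySem.List.pyRange (m - 1) (-1) (-1)) =
      (match PySem.List.max? ((d.filter (fun p => p.2.isSome && decide (0 ≤ p.1) && decide (p.1 < m))).map (·.1)) (fun x => x) with
       | some k => (pvLookup d k).getD none
       | none => none) := by
  cases hmax : PySem.List.max? ((d.filter (fun p => p.2.isSome && decide (0 ≤ p.1) && decide (p.1 < m))).map (·.1)) (fun x => x) with
  | none =>
    have hnil := (PySem.List.max?_eq_none_iff _ _).mp hmax
    have hnone : ∀ i, 0 ≤ i → i < m → pvHit d i = none := by
      intro i h0 hm
      apply pvHit_none_of_not_mem hnodup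
      intro v hv
      have : i ∈ (d.filter (fun p => p.2.isSome && decide (0 ≤ p.1) && decide (p.1 < m))).map (·.1) :=
        (mem_left_keys m d i).mpr ⟨v, hv, h0, hm⟩
      simp [hnil] at this
    exact scan_desc_none d m hnone m.toNat (m - 1) (by omega) (by omega)
  | some kmax =>
    have hkmem : kmax ∈ _ := PySem.List.max?_mem hmax
    have hall := PySem.List.max?_isMax hmax
    obtain ⟨v, hvd, h0k, hkm⟩ := (mem_left_keys m d kmax).mp hkmem
    have hlook : pvLookup d kmax = some (some v) := pvLookup_of_mem hnodup hvd
    have hhit : pvHit d kmax = some v := by simp [pvHit, hlook]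
    have habove : ∀ i, kmax < i → i < m → pvHit d i = none := by
      intro i hki hm
      apply pvHit_none_of_not_mem hnodup
      intro v' hv'
      have hi : i ∈ _ := (mem_left_keys m d i).mpr ⟨v', hv', by omega, hm⟩
      have := hall i hi
      simp at this
      omega
    have hres := scan_desc_hit d kmax v m h0k hhit habove (m - 1 - kmax).toNat
      (by omega)
    rw [show kmax + ((m - 1 - kmax).toNat : Int) = m - 1 by omega] at hres
    simp [hres, hlook]

-- right component: A's upward scan (bounded by the max key) = B's lookup at the min candidate key
lemma right_eq (m : Int) (d : List (Int × Option Int)) (hne : d ≠ [])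
    (hnodup : (d.map (·.1)).Nodup) :
    pvScanA d (PySem.List.pyRange (m + 1) ((PySem.List.max? (d.map (·.1)) (fun x => x)).getD 0 + 1) 1) =
      (match PySem.List.min? ((d.filter (fun p => p.2.isSome && decide (m < p.1))).map (·.1)) (fun x => x) with
       | some k => (pvLookup d k).getD none
       | none => none) := by
  obtain ⟨mk, hmk⟩ : ∃ mk, PySem.List.max? (d.map (·.1)) (fun x => x) = some mk := by
    cases hM : PySem.List.max? (d.map (·.1)) (fun x => x) with
    | none =>
      have := (PySem.List.max?_eq_none_iff _ _).mp hM
      exact absurd (List.map_eq_nil_iff.mp this) hne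
    | some mk => exact ⟨mk, rfl⟩
  have hMall := PySem.List.max?_isMax hmk
  rw [hmk]
  cases hmin : PySem.List.min? ((d.filter (fun p => p.2.isSome && decide (m < p.1))).map (·.1)) (fun x => x) with
  | none =>
    have hnil := (PySem.List.min?_eq_none_iff _ _).mp hmin
    have hnone : ∀ i, m + 1 ≤ i → i < mk + 1 → pvHit d i = none := by
      intro i h1 _
      apply pvHit_none_of_not_mem hnodup
      intro v hv
      have : i ∈ (d.filter (fun p => p.2.isSome && decide (m < p.1))).map (·.1) :=
        (mem_right_keys m d i).mpr ⟨v, hv, by omega⟩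
      simp [hnil] at this
    exact scan_asc_none d (m + 1) (mk + 1) hnone (mk + 1 - (m + 1)).toNat (m + 1)
      (by omega) (by omega)
  | some kmin =>
    have hkmem : kmin ∈ _ := PySem.List.min?_mem hmin
    have hall := PySem.List.min?_isMin hmin
    obtain ⟨v, hvd, hmk2⟩ := (mem_right_keys m d kmin).mp hkmem
    have hlook : pvLookup d kmin = some (some v) := pvLookup_of_mem hnodup hvd
    have hhit : pvHit d kmin = some v := by simp [pvHit, hlook]
    have hkey : kmin ∈ d.map (·.1) := List.mem_map.mpr ⟨(kmin, some v), hvd, rfl⟩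
    have hle : kmin ≤ mk := by simpa using hMall kmin hkey
    have hbelow : ∀ i, m + 1 ≤ i → i < kmin → pvHit d i = none := by
      intro i h1 h2
      apply pvHit_none_of_not_mem hnodup
      intro v' hv'
      have hi : i ∈ _ := (mem_right_keys m d i).mpr ⟨v', hv', by omega⟩
      have := hall i hi
      simp at this
      omega
    have hres := scan_asc_hit d kmin v (m + 1) (mk + 1) hhit hbelow (by omega)
      (kmin - (m + 1)).toNat (by omega)
    rw [show kmin - ((kmin - (m + 1)).toNat : Int) = m + 1 by omega] at hres
    simp [hres, hlook]

-- ===== VERDICT (by name: the statement is the Claim_ definition above) =====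
theorem get_adjacent_consensus_positions_spec : Claim_equal_get_adjacent_consensus_positions := by
  intro m d _ hpre
  obtain ⟨hne, hnodup⟩ := hpre
  unfold Spec_get_adjacent_consensus_positions get_adjacent_consensus_positions
    get_adjacent_consensus_positions_alt
  simp only []
  rw [Prod.mk.injEq]
  exact ⟨left_eq m d hnodup, right_eq m d hne hnodup⟩
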